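-- pv_equiv track=rewrite | github.com/nlopezn/Python-Coding-Samples | Medium_Triangle.py | solution
-- ===== SOURCE A (Python) =====
-- def solution(A):
--
--     if A==[] or len(A)<3:
--         return 0
--
--     #orderedA = sorted(A)      # doing a sort from smallest to largest is the heart of the solution.
--     orderedA = getOrdered(A)
--
--     for index in range(len(orderedA)-2):
--         A = orderedA[index]
--         B = orderedA[index+1]
--         C = orderedA[index +2]
--
--         if A+B>C:    # It is only necessary to check this condition. Since the array is ordered, C>A and C>B. So C+B>A, and C+A>B
--             return 1
--
--
--     return 0
--
-- def getOrdered(A):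
--
--     N = len(A)
--
--     n = int(N/2)
--
--     if N==1:
--         return A
--
--     temp_list = []
--     if N==2:
--         if A[1]<A[0]:
--             temp_list.append(A[1])
--             temp_list.append(A[0])
--             return temp_list
--
--         else:
--             return A
--     if N>2:
--         half_1 = A[:n]
--         half_2 = A[n:]
--
--         half_1_ordered = getOrdered(half_1)
--         half_2_ordered = getOrdered( half_2)
--
--         total_ordered_list = merge(half_1_ordered,half_2_ordered)
--
--         return total_ordered_list
--
-- def merge(A,B):
--     temp_array = []
--     pos_a = 0
--     pos_b = 0
--
--     for a in A:
--         for b in B[pos_b:]: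
--             if b<a:
--                 temp_array.append(b)
--                 pos_b = pos_b+1
--             elif a<=b:
--                 temp_array.append(a)
--                 pos_a = pos_a +1
--                 break
--     if pos_a<len(A):
--         temp_array = temp_array + A[pos_a:]
--     if pos_b<len(B):
--         temp_array = temp_array + B[pos_b:]
--
--     return temp_array
-- ===== SOURCE B (Python) =====
-- def solution(A):
--     # Brute force without sorting: test every triple of positions with the
--     # full three-inequality triangle condition, returning on the first hit.
--     while len(A) >= 3:
--         x, rest = A[0], A[1:]
--         t = rest
--         while len(t) >= 2:
--             y, t = t[0], t[1:]
--             if any(x + y > z and x + z > y and y + z > x for z in t):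
--                 return 1
--         A = rest
--     return 0
-- ===== Notes on version B (the rewrite author's own statement) =====
-- stated objective: alternative
-- what changed: B removes the sort entirely: instead of merge-sorting and scanning adjacent triples, it brute-forces every triple of positions with the full three-inequality triangle test and exits on the first hit (correct because a triangle triple exists iff a sorted-adjacent triple satisfies x+y>z).
import Mathlib
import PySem

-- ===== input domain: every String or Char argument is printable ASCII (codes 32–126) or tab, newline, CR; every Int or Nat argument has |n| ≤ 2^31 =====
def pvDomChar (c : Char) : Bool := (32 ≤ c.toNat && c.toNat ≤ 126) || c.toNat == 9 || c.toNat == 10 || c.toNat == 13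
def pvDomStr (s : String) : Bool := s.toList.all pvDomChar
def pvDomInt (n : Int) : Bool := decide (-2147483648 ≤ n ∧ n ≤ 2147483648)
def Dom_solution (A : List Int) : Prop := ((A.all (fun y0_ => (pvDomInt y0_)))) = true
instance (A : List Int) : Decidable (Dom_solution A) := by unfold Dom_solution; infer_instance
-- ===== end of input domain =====

-- B drops A's merge sort entirely and brute-forces every triple of positions with the
-- full triangle condition (alternative algorithm, not claimed faster); same return value.

-- ===== PORT A =====

-- inner 'for b in B[pos_b:]' loop of Python's merge: returns (elements appended,
-- number of B-elements consumed, whether the loop hit 'break')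
def mergeInner (a : Int) : List Int → List Int × Nat × Bool
  | [] => ([], 0, false)
  | b :: bs =>
    if b < a then
      let r := mergeInner a bs
      (b :: r.1, r.2.1 + 1, r.2.2)
    else  -- elif a <= b: append a; pos_a += 1; break
      ([a], 0, true)

-- one outer iteration 'for a in A' of merge; state = (temp_array, pos_a, pos_b)
def mergeStep (B : List Int) (st : List Int × Nat × Nat) (a : Int) : List Int × Nat × Nat :=
  let r := mergeInner a (B.drop st.2.2)   -- B[pos_b:] with pos_b ≥ 0 is drop
  (st.1 ++ r.1, if r.2.2 then st.2.1 + 1 else st.2.1, st.2.2 + r.2.1)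

-- the two trailing 'if pos_a < len(A)' / 'if pos_b < len(B)' appends of Python's merge
def mergeFin (A B : List Int) (st : List Int × Nat × Nat) : List Int :=
  let t1 := if st.2.1 < A.length then st.1 ++ A.drop st.2.1 else st.1
  if st.2.2 < B.length then t1 ++ B.drop st.2.2 else t1

def mergePy (A B : List Int) : List Int :=
  mergeFin A B (A.foldl (mergeStep B) ([], 0, 0))

-- getOrdered; Python's int(N/2) = N / 2 (Nat division) for any realistic length (< 2^53).
-- For N = 0 Python falls through returning None (unreachable from solution); we return [].
def getOrdered (A : List Int) : List Int :=
  let N := A.length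
  let n := N / 2
  if _h1 : N = 1 then A
  else if _h2 : N = 2 then
    if (PySem.List.pyGet? A 1).getD 0 < (PySem.List.pyGet? A 0).getD 0 then
      [(PySem.List.pyGet? A 1).getD 0, (PySem.List.pyGet? A 0).getD 0]
    else A
  else if _h3 : N > 2 then
    mergePy (getOrdered (A.take n)) (getOrdered (A.drop n))   -- A[:n], A[n:] with 0 ≤ n
  else []
termination_by A.length
decreasing_by
  · simp only [List.length_take]; omega
  · simp only [List.length_drop]; omega

-- 'for index in range(len(orderedA)-2)' reading the triple at index: the obvious
-- structural recursion over the adjacent triples, returning on the first hit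
def triLoop : List Int → Int
  | x :: y :: z :: rest => if x + y > z then 1 else triLoop (y :: z :: rest)
  | _ => 0

def solution (A : List Int) : Int :=
  if A = [] ∨ A.length < 3 then 0
  else triLoop (getOrdered A)

-- ===== PORT B =====

-- inner 'while len(t) >= 2: y, t = t[0], t[1:]; if any(...): return 1' of Source B
def innerScan (x : Int) : List Int → Bool
  | [] => false
  | y :: t =>
    if (y :: t).length < 2 then false
    else if t.any (fun z => decide (x + y > z) && decide (x + z > y) && decide (y + z > x)) then
      true
    else innerScan x t

-- outer 'while len(A) >= 3: x, rest = A[0], A[1:]; …; A = rest' of Source B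
def solution_alt : List Int → Int
  | [] => 0
  | x :: rest =>
    if (x :: rest).length < 3 then 0
    else if innerScan x rest then 1
    else solution_alt rest

-- ===== PRECONDITION & SPEC =====
def Spec_solution (A : List Int) (out : Int) : Prop := out = solution_alt A
instance (A : List Int) (out : Int) : Decidable (Spec_solution A out) := by unfold Spec_solution; infer_instance

-- ===== CLAIM (what is proved, stated in full; the proofs are below) =====
def Claim_equal_solution : Prop := ∀ (A : List Int), Dom_solution A → Spec_solution A (solution A)

-- ===== LEMMAS AND PROOFS =====

-- the triangle condition and "some triple of positions forms a triangle"
def Tri (x y z : Int) : Prop := x + y > z ∧ x + z > y ∧ y + z > x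

def HasTri (A : List Int) : Prop := ∃ x y z, [x, y, z].Sublist A ∧ Tri x y z

lemma tri_of_perm (l : List Int) (x y z : Int) (h : l.Perm [x, y, z]) (ht : Tri x y z) :
    ∃ a b c, l = [a, b, c] ∧ Tri a b c := by
  have hlen : l.length = 3 := by simpa using h.length_eq
  obtain ⟨a, b, c, rfl⟩ := List.length_eq_three.mp hlen
  refine ⟨a, b, c, rfl, ?_⟩
  have hsum : a + b + c = x + y + z := by
    have := h.sum_eq
    simp at this
    omega
  have hma : a ∈ [x, y, z] := h.mem_iff.mp (by simp)
  have hmb : b ∈ [x, y, z] := h.mem_iff.mp (by simp)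
  have hmc : c ∈ [x, y, z] := h.mem_iff.mp (by simp)
  obtain ⟨t1, t2, t3⟩ := ht
  simp only [List.mem_cons, List.not_mem_nil, or_false] at hma hmb hmc
  unfold Tri
  rcases hma with rfl | rfl | rfl <;> rcases hmb with rfl | rfl | rfl <;>
    rcases hmc with rfl | rfl | rfl <;> exact ⟨by omega, by omega, by omega⟩

lemma hasTri_perm {A B : List Int} (h : A.Perm B) : HasTri A → HasTri B := by
  rintro ⟨x, y, z, hs, ht⟩
  obtain ⟨l, hlp, hls⟩ := (hs.subperm).trans h.subperm
  obtain ⟨a, b, c, rfl, htri⟩ := tri_of_perm l x y z hlp ht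
  exact ⟨a, b, c, hls, htri⟩

lemma hasTri_length {A : List Int} (h : HasTri A) : 3 ≤ A.length := by
  obtain ⟨x, y, z, hs, -⟩ := h
  simpa using hs.length_le

lemma hasTri_cons {A : List Int} (a : Int) (h : HasTri A) : HasTri (a :: A) := by
  obtain ⟨x, y, z, hs, ht⟩ := h
  exact ⟨x, y, z, hs.trans (List.sublist_cons_self a A), ht⟩

-- B side -----------------------------------------------------------------

lemma innerScan_cons (x y : Int) (t : List Int) :
    innerScan x (y :: t) =
      (t.any (fun z => decide (x + y > z) && decide (x + z > y) && decide (y + z > x))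
        || innerScan x t) := by
  rcases t with _ | ⟨b, u⟩
  · simp [innerScan]
  · rw [innerScan]
    rw [if_neg (by simp)]
    by_cases h : (b :: u).any
        (fun z => decide (x + y > z) && decide (x + z > y) && decide (y + z > x)) = true
    · simp [h]
    · simp [h]

lemma innerScan_iff (x : Int) (rest : List Int) :
    innerScan x rest = true ↔ ∃ y z, [y, z].Sublist rest ∧ Tri x y z := by
  induction rest with
  | nil =>
    constructor
    · intro h; simp [innerScan] at h
    · rintro ⟨y, z, h, -⟩
      have := h.length_le; simp at this
  | cons y t ih =>
    rw [innerScan_cons]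
    constructor
    · intro h
      rcases Bool.or_eq_true_iff.mp h with h | h
      · obtain ⟨z, hz, htr⟩ := List.any_eq_true.mp h
        simp only [Bool.and_eq_true, decide_eq_true_eq] at htr
        exact ⟨y, z, List.cons_sublist_cons.mpr (List.singleton_sublist.mpr hz),
          htr.1.1, htr.1.2, htr.2⟩
      · obtain ⟨y', z, hs, htr⟩ := ih.mp h
        exact ⟨y', z, hs.trans (List.sublist_cons_self y t), htr⟩
    · rintro ⟨y', z, hs, htr⟩
      apply Bool.or_eq_true_iff.mpr
      rcases List.sublist_cons_iff.mp hs with h | ⟨r, heq, hr⟩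
      · exact Or.inr (ih.mpr ⟨y', z, h, htr⟩)
      · obtain ⟨h1, h2⟩ : y' = y ∧ [z] = r := by
          injection heq with ha hb; exact ⟨ha, hb⟩
        subst h1
        rw [← h2] at hr
        have hz : z ∈ t := List.singleton_sublist.mp hr
        obtain ⟨t1, t2, t3⟩ := htr
        exact Or.inl (List.any_eq_true.mpr ⟨z, hz, by simp [t1, t2, t3]⟩)

lemma alt_pos : ∀ (A : List Int), HasTri A → solution_alt A = 1 := by
  intro A
  induction A with
  | nil => intro h; exact absurd (hasTri_length h) (by simp)
  | cons x rest ih =>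
    intro h
    have hlen : ¬ ((x :: rest).length < 3) := by
      have := hasTri_length h; omega
    rw [solution_alt, if_neg hlen]
    by_cases hscan : innerScan x rest = true
    · rw [if_pos hscan]
    · rw [if_neg hscan]
      obtain ⟨a, b, c, hs, ht⟩ := h
      rcases List.sublist_cons_iff.mp hs with h2 | ⟨r, heq, hr⟩
      · exact ih ⟨a, b, c, h2, ht⟩
      · obtain ⟨h1, h2⟩ : a = x ∧ [b, c] = r := by
          injection heq with ha hb; exact ⟨ha, hb⟩
        subst h1
        rw [← h2] at hr
        exact absurd ((innerScan_iff a rest).mpr ⟨b, c, hr, ht⟩) hscan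

lemma alt_zero : ∀ (A : List Int), ¬ HasTri A → solution_alt A = 0 := by
  intro A
  induction A with
  | nil => intro _; rfl
  | cons x rest ih =>
    intro h
    by_cases hlen : (x :: rest).length < 3
    · rw [solution_alt, if_pos hlen]
    · have hscan : ¬ (innerScan x rest = true) := by
        intro hs
        obtain ⟨y, z, hsub, ht⟩ := (innerScan_iff x rest).mp hs
        exact h ⟨x, y, z, List.cons_sublist_cons.mpr hsub, ht⟩
      have hrest : ¬ HasTri rest := fun hh => h (hasTri_cons x hh)
      rw [solution_alt, if_neg hlen, if_neg hscan]
      exact ih hrest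

-- A side -----------------------------------------------------------------

lemma triLoop_cons_of (a : Int) {t : List Int} (h : triLoop t = 1) :
    triLoop (a :: t) = 1 := by
  rcases t with _ | ⟨y, _ | ⟨z, r⟩⟩
  · simp [triLoop] at h
  · simp [triLoop] at h
  · rw [triLoop]
    split_ifs with h1
    · rfl
    · exact h

lemma triLoop_zero_or_one (s : List Int) : triLoop s = 0 ∨ triLoop s = 1 := by
  fun_induction triLoop s with
  | case1 x y z rest h => right; simp [triLoop, h]
  | case2 x y z rest h ih => simpa [triLoop, h] using ih
  | case3 s hm =>
    rcases s with _ | ⟨x, _ | ⟨y, _ | ⟨z, rest⟩⟩⟩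
    · left; simp [triLoop]
    · left; simp [triLoop]
    · left; simp [triLoop]
    · exact absurd trivial (by simpa using hm x y z rest)

lemma sorted_triple_key :
    ∀ s : List Int, s.Pairwise (· ≤ ·) → ∀ x y z : Int, [x, y, z].Sublist s → x + y > z →
      triLoop s = 1 := by
  intro s
  induction s with
  | nil =>
    intro _ x y z hs _
    have := hs.length_le; simp at this
  | cons a t ih =>
    intro hp x y z hs hxy
    rcases List.sublist_cons_iff.mp hs with h | ⟨r, heq, hr⟩
    · exact triLoop_cons_of a (ih (List.pairwise_cons.mp hp).2 x y z h hxy)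
    · obtain ⟨h1, h2⟩ : x = a ∧ [y, z] = r := by
        injection heq with ha hb; exact ⟨ha, hb⟩
      subst h1
      rw [← h2] at hr
      rcases t with _ | ⟨b, u⟩
      · have := hr.length_le; simp at this
      have hab : x ≤ b := (List.pairwise_cons.mp hp).1 b (by simp)
      rcases List.sublist_cons_iff.mp hr with h3 | ⟨r2, heq2, hr2⟩
      · have hsub : [b, y, z].Sublist (b :: u) := List.cons_sublist_cons.mpr h3
        exact triLoop_cons_of x (ih (List.pairwise_cons.mp hp).2 b y z hsub (by omega))
      · obtain ⟨h4, h5⟩ : y = b ∧ [z] = r2 := by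
          injection heq2 with ha hb; exact ⟨ha, hb⟩
        subst h4
        rw [← h5] at hr2
        have hz : z ∈ u := List.singleton_sublist.mp hr2
        rcases u with _ | ⟨c, u'⟩
        · simp at hz
        rcases List.mem_cons.mp hz with h6 | hz'
        · subst h6
          simp [triLoop, hxy]
        · have hyc : y ≤ c :=
            (List.pairwise_cons.mp (List.pairwise_cons.mp hp).2).1 c (by simp)
          have hsub : [y, c, z].Sublist (y :: c :: u') :=
            List.cons_sublist_cons.mpr
              (List.cons_sublist_cons.mpr (List.singleton_sublist.mpr hz'))
          exact triLoop_cons_of x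
            (ih (List.pairwise_cons.mp hp).2 y c z hsub (by omega))

lemma triLoop_one_hasTri :
    ∀ s : List Int, s.Pairwise (· ≤ ·) → triLoop s = 1 → HasTri s := by
  intro s
  fun_induction triLoop s with
  | case1 x y z rest h =>
    intro hp _
    have hxy : x ≤ y := (List.pairwise_cons.mp hp).1 y (by simp)
    have hyz : y ≤ z := (List.pairwise_cons.mp (List.pairwise_cons.mp hp).2).1 z (by simp)
    refine ⟨x, y, z, ?_, ⟨h, by omega, by omega⟩⟩
    exact List.cons_sublist_cons.mpr (List.cons_sublist_cons.mpr
      (List.cons_sublist_cons.mpr (List.nil_sublist rest)))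
  | case2 x y z rest h ih =>
    intro hp h1
    have h2 : triLoop (y :: z :: rest) = 1 := by simpa [triLoop, h] using h1
    exact hasTri_cons x (ih (List.pairwise_cons.mp hp).2 h2)
  | case3 s hm =>
    intro _ h1
    rcases s with _ | ⟨x, _ | ⟨y, _ | ⟨z, rest⟩⟩⟩
    · simp [triLoop] at h1
    · simp [triLoop] at h1
    · simp [triLoop] at h1
    · exact absurd trivial (by simpa using hm x y z rest)

-- carried over facts about A's merge sort ---------------------------------

def mrg : List Int → List Int → List Int
  | as, [] => as
  | [], bs => bs
  | a :: as, b :: bs => if b < a then b :: mrg (a :: as) bs else a :: mrg as (b :: bs)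
termination_by as bs => as.length + bs.length

lemma foldl_mergeStep_empty (B : List Int) :
    ∀ (as : List Int) (t : List Int) (pa pb : Nat), B.drop pb = [] →
      as.foldl (mergeStep B) (t, pa, pb) = (t, pa, pb) := by
  intro as
  induction as with
  | nil => intro t pa pb _; rfl
  | cons a as ih =>
    intro t pa pb h
    simp only [List.foldl_cons, mergeStep, h, mergeInner]
    simpa using ih t pa pb h

lemma foldl_mergeStep_mrg (B : List Int) :
    ∀ (as bs : List Int) (A t : List Int) (pa pb : Nat),
      A.drop pa = as → B.drop pb = bs →
      mergeFin A B (as.foldl (mergeStep B) (t, pa, pb)) = t ++ mrg as bs := by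
  intro as bs
  fun_induction mrg as bs with
  | case1 as =>
    intro A t pa pb hA hB
    rw [foldl_mergeStep_empty B as t pa pb hB]
    have hblen : B.length ≤ pb := List.drop_eq_nil_iff.mp hB
    simp only [mergeFin, hA, hB]
    by_cases hpa : pa < A.length
    · simp [hpa, Nat.not_lt_of_le hblen]
    · have : as = [] := by
        rw [← hA]; exact List.drop_eq_nil_iff.mpr (Nat.le_of_not_lt hpa)
      simp [hpa, Nat.not_lt_of_le hblen, this]
  | case2 bs hbs =>
    intro A t pa pb hA hB
    have hpa : ¬ pa < A.length := by
      have := List.drop_eq_nil_iff.mp hA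
      omega
    have hpb : pb < B.length := by
      by_contra h
      rw [List.drop_eq_nil_iff.mpr (by omega)] at hB
      exact hbs hB.symm
    simp [mergeFin, hpa, hpb, hB]
  | case3 a as b bs hlt ih =>
    intro A t pa pb hA hB
    have hB' : B.drop (pb + 1) = bs := by
      rw [← List.drop_drop, hB]; rfl
    have step1 : (List.foldl (mergeStep B) (t, pa, pb) (a :: as)) =
        (List.foldl (mergeStep B) (t ++ [b], pa, pb + 1) (a :: as)) := by
      simp only [List.foldl_cons, mergeStep, hB, hB', mergeInner, hlt, if_pos]
      simp [List.append_assoc, Nat.add_comm, Nat.add_left_comm]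
    rw [step1, ih A (t ++ [b]) pa (pb + 1) hA hB']
    simp
  | case4 a as b bs hlt ih =>
    intro A t pa pb hA hB
    have hA' : A.drop (pa + 1) = as := by
      rw [← List.drop_drop, hA]; rfl
    have step1 : (List.foldl (mergeStep B) (t, pa, pb) (a :: as)) =
        (List.foldl (mergeStep B) (t ++ [a], pa + 1, pb) as) := by
      simp [List.foldl_cons, mergeStep, hB, mergeInner, hlt]
    rw [step1, ih A (t ++ [a]) (pa + 1) pb hA' hB]
    simp

lemma mergePy_eq_mrg (A B : List Int) : mergePy A B = mrg A B := by
  simpa using foldl_mergeStep_mrg B A B A [] 0 0 (by simp) (by simp)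

lemma mrg_perm : ∀ as bs : List Int, (mrg as bs).Perm (as ++ bs) := by
  intro as bs
  fun_induction mrg as bs with
  | case1 as => simp
  | case2 bs hbs => simp
  | case3 a as b bs hlt ih => exact (ih.cons b).trans List.perm_middle.symm
  | case4 a as b bs hlt ih => exact ih.cons a

lemma mem_mrg {x : Int} {as bs : List Int} (h : x ∈ mrg as bs) : x ∈ as ∨ x ∈ bs := by
  have := (mrg_perm as bs).mem_iff.mp h
  simpa using this

lemma mrg_pairwise : ∀ as bs : List Int,
    as.Pairwise (· ≤ ·) → bs.Pairwise (· ≤ ·) → (mrg as bs).Pairwise (· ≤ ·) := by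
  intro as bs
  fun_induction mrg as bs with
  | case1 as => intro h _; exact h
  | case2 bs hbs => intro _ h; exact h
  | case3 a as b bs hlt ih =>
    intro ha hb
    rw [List.pairwise_cons] at hb ⊢
    refine ⟨?_, ih ha hb.2⟩
    intro y hy
    rcases mem_mrg hy with h1 | h1
    · rcases List.mem_cons.mp h1 with rfl | h2
      · exact le_of_lt hlt
      · exact le_trans (le_of_lt hlt) ((List.pairwise_cons.mp ha).1 y h2)
    · exact hb.1 y h1
  | case4 a as b bs hlt ih =>
    intro ha hb
    rw [List.pairwise_cons] at ha ⊢
    refine ⟨?_, ih ha.2 hb⟩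
    intro y hy
    rcases mem_mrg hy with h1 | h1
    · exact ha.1 y h1
    · have hab : a ≤ b := le_of_not_gt hlt
      rcases List.mem_cons.mp h1 with rfl | h2
      · exact hab
      · exact le_trans hab ((List.pairwise_cons.mp hb).1 y h2)

lemma getOrdered_perm_pairwise : ∀ (N : Nat) (A : List Int), A.length = N → A ≠ [] →
    (getOrdered A).Perm A ∧ (getOrdered A).Pairwise (· ≤ ·) := by
  intro N
  induction N using Nat.strong_induction_on with
  | _ N ih =>
  intro A hN hne
  rw [getOrdered]
  by_cases h1 : A.length = 1
  · simp only [h1, dif_pos]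
    obtain ⟨x, rfl⟩ := List.length_eq_one_iff.mp h1
    exact ⟨List.Perm.refl _, by simp⟩
  · by_cases h2 : A.length = 2
    · obtain ⟨x, y, rfl⟩ := List.length_eq_two.mp h2
      simp only [h1, h2, dif_neg, dif_pos, not_false_iff]
      have hx : (PySem.List.pyGet? [x, y] 0).getD 0 = x := by
        simp [PySem.List.pyGet?, PySem.List.pyIdx?]
      have hy : (PySem.List.pyGet? [x, y] 1).getD 0 = y := by
        simp [PySem.List.pyGet?, PySem.List.pyIdx?]
      rw [hx, hy]
      by_cases hxy : y < x
      · simp only [hxy, if_pos]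
        exact ⟨List.Perm.swap x y [], by simp [le_of_lt hxy]⟩
      · simp only [hxy, if_neg, not_false_iff]
        exact ⟨List.Perm.refl _, by simp [le_of_not_gt hxy]⟩
    · have h3 : A.length > 2 := by
        rcases A with _ | ⟨a, A⟩
        · exact absurd rfl hne
        · simp only [List.length_cons] at h1 h2 ⊢; omega
      simp only [h1, h2, h3, dif_neg, dif_pos, not_false_iff]
      set n := A.length / 2 with hn
      have htlen : (A.take n).length = n := by simp; omega
      have hdlen : (A.drop n).length = A.length - n := by simp
      have htne : A.take n ≠ [] := by
        intro h; rw [h] at htlen; simp at htlen; omega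
      have hdne : A.drop n ≠ [] := by
        intro h; rw [h] at hdlen; simp at hdlen; omega
      have iht := ih (A.take n).length (by omega) (A.take n) rfl htne
      have ihd := ih (A.drop n).length (by omega) (A.drop n) rfl hdne
      rw [mergePy_eq_mrg]
      constructor
      · exact (mrg_perm _ _).trans ((iht.1.append ihd.1).trans (by rw [List.take_append_drop]))
      · exact mrg_pairwise _ _ iht.2 ihd.2

-- characterisation of A -----------------------------------------------------

lemma sol_pos (A : List Int) (h : HasTri A) : solution A = 1 := by
  have hlen := hasTri_length h
  have hne : A ≠ [] := by intro hh; rw [hh] at hlen; simp at hlen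
  obtain ⟨hperm, hpair⟩ := getOrdered_perm_pairwise A.length A rfl hne
  have hcond : ¬ (A = [] ∨ A.length < 3) := by
    rintro (hh | hh)
    · exact hne hh
    · omega
  rw [solution, if_neg hcond]
  obtain ⟨x, y, z, hs, ht⟩ := hasTri_perm hperm.symm h
  exact sorted_triple_key _ hpair x y z hs ht.1

lemma sol_zero (A : List Int) (h : ¬ HasTri A) : solution A = 0 := by
  rw [solution]
  by_cases hcond : A = [] ∨ A.length < 3
  · rw [if_pos hcond]
  · rw [if_neg hcond]
    have hne : A ≠ [] := fun hh => hcond (Or.inl hh)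
    obtain ⟨hperm, hpair⟩ := getOrdered_perm_pairwise A.length A rfl hne
    rcases triLoop_zero_or_one (getOrdered A) with h0 | h1
    · exact h0
    · exact absurd (hasTri_perm hperm (triLoop_one_hasTri _ hpair h1)) h

-- ===== VERDICT (by name: the statement is the Claim_ definition above) =====
theorem solution_spec : Claim_equal_solution := by
  intro A _
  unfold Spec_solution
  by_cases h : HasTri A
  · rw [sol_pos A h, alt_pos A h]
  · rw [sol_zero A h, alt_zero A h]
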